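-- pv_equiv track=rewrite | github.com/Mishanya0/LW2refact | 3.py | count_nonzero_columns
-- ===== SOURCE A (Python) =====
-- def count_nonzero_columns(matrix):
--     num_rows = len(matrix)
--     num_cols = len(matrix[0])
--     count = 0
--     for j in range(num_cols):
--         zero = False
--         for i in range(num_rows):
--             if matrix[i][j] == 0:
--                 zero = True
--                 break
--         if not zero:
--             count += 1
--
--     return count
--
-- matrix = []
-- ===== SOURCE B (Python) =====
-- def count_nonzero_columns(matrix):
--     num_cols = len(matrix[0])
--     dead = set()
--     for row in matrix:
--         for j, x in enumerate(row):
--             if j < num_cols and x == 0: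
--                 dead.add(j)
--     return num_cols - len(dead)
-- ===== Notes on version B (the rewrite author's own statement) =====
-- stated objective: alternative
-- what changed: Replaces the column-major scan with per-column early-break by a single row-major sweep that collects the set of zero-containing column indices and returns num_cols - len(dead).
-- outside the precondition, e.g. on count_nonzero_columns([[0], []]): A returns 0, B returns 0
import Mathlib
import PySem

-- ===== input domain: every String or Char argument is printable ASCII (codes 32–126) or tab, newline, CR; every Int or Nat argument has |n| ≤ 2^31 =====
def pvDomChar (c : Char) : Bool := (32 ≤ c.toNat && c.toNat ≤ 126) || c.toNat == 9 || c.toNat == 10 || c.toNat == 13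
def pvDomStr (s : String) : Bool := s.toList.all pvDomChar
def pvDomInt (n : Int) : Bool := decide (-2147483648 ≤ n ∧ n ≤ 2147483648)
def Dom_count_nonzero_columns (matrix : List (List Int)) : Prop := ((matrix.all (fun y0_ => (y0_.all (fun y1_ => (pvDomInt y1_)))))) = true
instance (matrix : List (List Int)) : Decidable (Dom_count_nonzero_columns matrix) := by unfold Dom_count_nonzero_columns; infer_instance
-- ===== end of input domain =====

-- B replaces A's column-major scan (early-break per column) by a row-major sweep collecting
-- the set of zero-containing column indices; same cost, different traversal (alternative).


-- ===== PORT A =====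
-- num_rows = len(matrix); the inner 'for i in range(num_rows): if matrix[i][j] == 0: break'
-- is the short-circuiting scan matrix.any; matrix[i][j] is row.getD j 1 (under Pre_ j is always in range).
def count_nonzero_columns (matrix : List (List Int)) : Int :=
  let numCols := (matrix.headD []).length
  (List.range numCols).foldl (fun count j =>
    let zero := matrix.any (fun row => row.getD j 1 == 0)
    if !zero then count + 1 else count) 0

-- ===== PORT B =====
def count_nonzero_columns_alt (matrix : List (List Int)) : Int :=
  let numCols := (matrix.headD []).length
  let dead : PySem.Set Int :=
    matrix.foldl (fun d row =>
      (PySem.List.enumerate row).foldl (fun d p =>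
        if p.1 < (numCols : Int) ∧ p.2 = 0 then PySem.Set.add d p.1 else d) d)
      PySem.Set.empty
  (numCols : Int) - (dead.length : Int)

-- ===== PRECONDITION & SPEC =====
-- Pre_ excludes the empty matrix (both programs raise IndexError on len(matrix[0])) and jagged
-- matrices with a row shorter than row 0, on which A usually raises IndexError and otherwise
-- returns 0 only because every column hit a zero before the short row.
def Pre_count_nonzero_columns (matrix : List (List Int)) : Prop :=
  matrix ≠ [] ∧ ∀ row ∈ matrix, (matrix.headD []).length ≤ row.length
instance (matrix : List (List Int)) : Decidable (Pre_count_nonzero_columns matrix) := by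
  unfold Pre_count_nonzero_columns; infer_instance

def pvWitness_count_nonzero_columns : List (List Int) := [[1, 0], [2, 3]]

def Spec_count_nonzero_columns (matrix : List (List Int)) (out : Int) : Prop := out = count_nonzero_columns_alt matrix
instance (matrix : List (List Int)) (out : Int) : Decidable (Spec_count_nonzero_columns matrix out) := by unfold Spec_count_nonzero_columns; infer_instance

-- ===== CLAIM (what is proved, stated in full; the proofs are below) =====
def Claim_equal_count_nonzero_columns : Prop := ∀ (matrix : List (List Int)), Dom_count_nonzero_columns matrix → Pre_count_nonzero_columns matrix → Spec_count_nonzero_columns matrix (count_nonzero_columns matrix)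

-- ===== LEMMAS AND PROOFS =====

-- proof-side abbreviations for A's column test and the per-row zero-column index list
def pvQ (matrix : List (List Int)) (j : Nat) : Bool :=
  matrix.any (fun row => row.getD j 1 == 0)

def pvCols (nc : Nat) (row : List Int) : List Int :=
  ((PySem.List.enumerate row).filter (fun p => decide (p.1 < (nc : Int) ∧ p.2 = 0))).map (·.1)

-- the inner fold of B collects the first components of the condition-satisfying pairs
theorem pv_inner_fold (nc : Nat) (l : List (Int × Int)) (d : PySem.Set Int) :
    l.foldl (fun d p => if p.1 < (nc : Int) ∧ p.2 = 0 then PySem.Set.add d p.1 else d) d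
      = ((l.filter (fun p => decide (p.1 < (nc : Int) ∧ p.2 = 0))).map (·.1)).foldl PySem.Set.add d := by
  induction l generalizing d with
  | nil => rfl
  | cons p l ih =>
      simp only [List.foldl_cons, List.filter_cons]
      by_cases h : p.1 < (nc : Int) ∧ p.2 = 0 <;> simp [h, ih]

-- B's dead set is set() of the flattened per-row lists of zero-column indices
theorem pv_dead_eq (matrix : List (List Int)) (nc : Nat) :
    matrix.foldl (fun d row =>
      (PySem.List.enumerate row).foldl (fun d p =>
        if p.1 < (nc : Int) ∧ p.2 = 0 then PySem.Set.add d p.1 else d) d)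
      PySem.Set.empty
    = PySem.Set.ofList (matrix.flatMap (pvCols nc)) := by
  rw [PySem.Set.ofList_eq_foldl, List.foldl_flatMap]
  exact PySem.List.foldl_congr_mem matrix _ _ _
    (fun d row _ => pv_inner_fold nc (PySem.List.enumerate row) d)

theorem pv_mem_dead (matrix : List (List Int)) (nc : Nat)
    (hPre : ∀ row ∈ matrix, nc ≤ row.length) (x : Int) :
    x ∈ matrix.flatMap (pvCols nc)
      ↔ x ∈ ((List.range nc).filter (pvQ matrix)).map (fun (j : Nat) => (j : Int)) := by
  constructor
  · intro hx
    obtain ⟨row, hrow, hx⟩ := List.mem_flatMap.mp hx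
    obtain ⟨p, hp, rfl⟩ := List.mem_map.mp hx
    obtain ⟨hpmem, hpc⟩ := List.mem_filter.mp hp
    obtain ⟨k, hk, rfl⟩ := (PySem.List.mem_enumerate_iff row 0 p).mp hpmem
    simp only [decide_eq_true_eq] at hpc
    obtain ⟨hc, hz⟩ := hpc
    have hkn : k < nc := by simp only [zero_add] at hc; exact_mod_cast hc
    refine List.mem_map.mpr ⟨k, List.mem_filter.mpr ⟨List.mem_range.mpr hkn, ?_⟩, by simp⟩
    refine List.any_eq_true.mpr ⟨row, hrow, ?_⟩
    rw [List.getD_eq_getElem _ _ hk]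
    simpa using hz
  · intro hx
    obtain ⟨j, hj, rfl⟩ := List.mem_map.mp hx
    obtain ⟨hjr, hq⟩ := List.mem_filter.mp hj
    have hjn := List.mem_range.mp hjr
    obtain ⟨row, hrow, hz⟩ := List.any_eq_true.mp hq
    have hjl : j < row.length := lt_of_lt_of_le hjn (hPre row hrow)
    rw [List.getD_eq_getElem _ _ hjl] at hz
    refine List.mem_flatMap.mpr ⟨row, hrow, List.mem_map.mpr
      ⟨((0 : Int) + (j : Int), row[j]), List.mem_filter.mpr ⟨?_, ?_⟩, by simp⟩⟩
    · exact (PySem.List.mem_enumerate_iff row 0 _).mpr ⟨j, hjl, rfl⟩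
    · simp only [decide_eq_true_eq]
      exact ⟨by simpa using (by exact_mod_cast hjn : (j : Int) < (nc : Int)), by simpa using hz⟩

-- length of B's dead set = number of columns whose A-test fires
theorem pv_dead_len (matrix : List (List Int)) (nc : Nat)
    (hPre : ∀ row ∈ matrix, nc ≤ row.length) :
    (matrix.foldl (fun d row =>
      (PySem.List.enumerate row).foldl (fun d p =>
        if p.1 < (nc : Int) ∧ p.2 = 0 then PySem.Set.add d p.1 else d) d)
      PySem.Set.empty).length = (List.range nc).countP (pvQ matrix) := by
  rw [pv_dead_eq]
  have hperm : (PySem.Set.ofList (matrix.flatMap (pvCols nc))).Perm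
      (((List.range nc).filter (pvQ matrix)).map (fun (j : Nat) => (j : Int))) := by
    rw [List.perm_ext_iff_of_nodup (PySem.Set.nodup_ofList _)
      ((List.Nodup.filter _ (List.nodup_range)).map (fun a b h => by exact_mod_cast h))]
    intro x
    rw [PySem.Set.mem_ofList]
    exact pv_mem_dead matrix nc hPre x
  rw [hperm.length_eq, List.length_map, ← List.countP_eq_length_filter]

-- A's value: count of columns where the test does not fire
theorem pv_A_val (matrix : List (List Int)) :
    count_nonzero_columns matrix
      = ((List.range (matrix.headD []).length).countP (fun j => !pvQ matrix j) : Int) := by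
  show (List.range (matrix.headD []).length).foldl (fun count j =>
      if (fun j => !pvQ matrix j) j = true then count + 1 else count) 0 = _
  rw [PySem.List.foldl_if_add_one (fun j => !pvQ matrix j) _ 0, Int.zero_add]

-- B's value: num_cols minus the number of columns where the test fires
theorem pv_B_val (matrix : List (List Int))
    (hPre : ∀ row ∈ matrix, (matrix.headD []).length ≤ row.length) :
    count_nonzero_columns_alt matrix
      = ((matrix.headD []).length : Int)
        - ((List.range (matrix.headD []).length).countP (pvQ matrix) : Int) := by
  show ((matrix.headD []).length : Int) - ((matrix.foldl (fun d row =>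
      (PySem.List.enumerate row).foldl (fun d p =>
        if p.1 < (((matrix.headD []).length : Nat) : Int) ∧ p.2 = 0 then PySem.Set.add d p.1 else d) d)
      PySem.Set.empty).length : Int) = _
  rw [pv_dead_len matrix (matrix.headD []).length hPre]

-- ===== VERDICT (by name: the statement is the Claim_ definition above) =====
theorem count_nonzero_columns_spec : Claim_equal_count_nonzero_columns := by
  intro matrix _ hPre
  obtain ⟨-, hrect⟩ := hPre
  unfold Spec_count_nonzero_columns
  rw [pv_A_val, pv_B_val matrix hrect]
  have hsplit : (List.range (matrix.headD []).length).length
      = (List.range (matrix.headD []).length).countP (pvQ matrix)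
        + (List.range (matrix.headD []).length).countP (fun j => !pvQ matrix j) :=
by
    have h := List.length_eq_countP_add_countP (pvQ matrix)
      (l := List.range (matrix.headD []).length)
    have he : (fun a => decide ¬pvQ matrix a = true) = (fun j => !pvQ matrix j) := by
      funext a; simp
    rwa [he] at h
  rw [List.length_range] at hsplit
  omega
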